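-- pv_equiv track=rewrite | github.com/pmatigakis/text-analysis-helpers | text_analysis_helpers/keywords/rake.py | _find_candidate_keyword_aliases
-- ===== SOURCE A (Python) =====
-- from collections import defaultdict
-- from typing import Callable, Dict, List, Optional, Set, Tuple
--
-- def _find_candidate_keyword_aliases(
--     candidate_keywords: List[List[str]]
-- ) -> Dict[Tuple, Set[Tuple]]:
--     """Find the keyword aliases
--
--     A keyword alias is basically just another form of the keyword that
--     contains characters that might differ because they are lowercase or
--     uppercase.
--
--     :param candidate_keywords: the keywords
--     :return: a dictionary with the aliases mapping
--     """
--     candidate_keyword_aliases = defaultdict(set)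
--     for candidate in candidate_keywords:
--         normalised_candidate = tuple([word.lower() for word in candidate])
--         candidate_keyword_aliases[normalised_candidate].add(
--             tuple(candidate)
--         )
--
--     return candidate_keyword_aliases
-- ===== SOURCE B (Python) =====
-- from collections import defaultdict
--
--
-- def _find_candidate_keyword_aliases(candidate_keywords):
--     normalised = [
--         tuple(word.lower() for word in candidate)
--         for candidate in candidate_keywords
--     ]
--     originals = [tuple(candidate) for candidate in candidate_keywords]
--     aliases = defaultdict(set)
--     for key in dict.fromkeys(normalised):
--         aliases[key] = {
--             orig for norm, orig in zip(normalised, originals) if norm == key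
--         }
--     return aliases
-- ===== Notes on version B (the rewrite author's own statement) =====
-- stated objective: alternative
-- what changed: B precomputes the normalized key for every candidate, dedups the keys in first-occurrence order with dict.fromkeys, and builds each group's alias set in one bulk set-comprehension over the zipped (key, original) pairs, instead of A's single loop that incrementally adds each candidate into a growing defaultdict of sets.
import Mathlib
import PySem

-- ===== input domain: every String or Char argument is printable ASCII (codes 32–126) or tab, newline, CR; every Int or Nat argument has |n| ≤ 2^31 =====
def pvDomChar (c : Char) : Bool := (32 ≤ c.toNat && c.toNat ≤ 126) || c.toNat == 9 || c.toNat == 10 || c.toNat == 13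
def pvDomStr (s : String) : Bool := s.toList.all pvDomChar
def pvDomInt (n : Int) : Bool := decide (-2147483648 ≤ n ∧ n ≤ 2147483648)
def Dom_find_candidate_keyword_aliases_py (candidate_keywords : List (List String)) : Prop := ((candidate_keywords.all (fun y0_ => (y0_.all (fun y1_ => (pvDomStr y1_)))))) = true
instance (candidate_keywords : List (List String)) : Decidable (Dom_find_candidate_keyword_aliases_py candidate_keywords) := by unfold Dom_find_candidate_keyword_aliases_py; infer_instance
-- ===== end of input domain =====

-- B groups via dedup'd normalized keys + a bulk filter per key instead of A's incremental defaultdict loop; alternative decomposition, same result.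

-- ===== PORT A =====
-- tuple([word.lower() for word in candidate])
def pvNormalize (candidate : List String) : List String :=
  candidate.map PySem.Str.lower

def find_candidate_keyword_aliases_py (candidate_keywords : List (List String)) : List (List String × List (List String)) :=
  (candidate_keywords.foldl
      (fun d candidate =>
        d.modify (pvNormalize candidate) PySem.Set.empty (fun s => PySem.Set.add s candidate))
      PySem.Dict.empty).items

-- ===== PORT B =====
def find_candidate_keyword_aliases_py_alt (candidate_keywords : List (List String)) : List (List String × List (List String)) :=
  let normalised := candidate_keywords.map pvNormalize
  let originals := candidate_keywords
  (( PySem.List.dedup normalised).foldl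
      (fun d key =>
        d.insert key
          (PySem.Set.ofList (((normalised.zip originals).filter (fun p => p.1 == key)).map (·.2))))
      PySem.Dict.empty).items

-- ===== PRECONDITION & SPEC =====
def Spec_find_candidate_keyword_aliases_py (candidate_keywords : List (List String)) (out : List (List String × List (List String))) : Prop := out = find_candidate_keyword_aliases_py_alt candidate_keywords
instance (candidate_keywords : List (List String)) (out : List (List String × List (List String))) : Decidable (Spec_find_candidate_keyword_aliases_py candidate_keywords out) := by unfold Spec_find_candidate_keyword_aliases_py; infer_instance

-- ===== CLAIM (what is proved, stated in full; the proofs are below) =====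
def Claim_equal_find_candidate_keyword_aliases_py : Prop := ∀ (candidate_keywords : List (List String)), Dom_find_candidate_keyword_aliases_py candidate_keywords → Spec_find_candidate_keyword_aliases_py candidate_keywords (find_candidate_keyword_aliases_py candidate_keywords)

-- ===== LEMMAS AND PROOFS =====

-- zip-with-keys then project = plain filter on the normalized key
theorem pv_zip_filter_map (cks : List (List String)) (k : List String) :
    (((cks.map pvNormalize).zip cks).filter (fun p => p.1 == k)).map (·.2)
      = cks.filter (fun c => pvNormalize c == k) := by
  induction cks with
  | nil => rfl
  | cons c l ih =>
      by_cases h : pvNormalize c = k <;>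
        simp [h, ih]

-- value of A's fold at a key: the starting value updated with all matching candidates
theorem pv_foldA_getD (l : List (List String))
    (d : PySem.Dict (List String) (PySem.Set (List String))) (k : List String) :
    (l.foldl
        (fun d candidate =>
          d.modify (pvNormalize candidate) PySem.Set.empty (fun s => PySem.Set.add s candidate))
        d).getD k PySem.Set.empty
      = PySem.Set.update (d.getD k PySem.Set.empty) (l.filter (fun c => pvNormalize c == k)) := by
  induction l generalizing d with
  | nil => rfl
  | cons c l ih =>
      simp only [List.foldl_cons, ih, List.filter_cons]
      by_cases h : pvNormalize c = k
      · subst h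
        simp [PySem.Dict.getD_modify_self, PySem.Set.update]
      · have h' : (pvNormalize c == k) = false := by simpa using h
        rw [PySem.Dict.getD_modify_of_ne _ _ _ (by simpa using Ne.symm h)]
        simp [h']

theorem find_candidate_keyword_aliases_py_spec : Claim_equal_find_candidate_keyword_aliases_py := by
  intro cks _
  unfold Spec_find_candidate_keyword_aliases_py
  unfold find_candidate_keyword_aliases_py find_candidate_keyword_aliases_py_alt
  set dA := cks.foldl
      (fun d candidate =>
        d.modify (pvNormalize candidate) PySem.Set.empty (fun s => PySem.Set.add s candidate))
      PySem.Dict.empty with hdA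
  have hAkeys : dA.keys = PySem.List.dedup (cks.map pvNormalize) := by
    rw [hdA, PySem.Dict.keys_foldl_modify_key]
    simp [PySem.Set.update, PySem.Set.ofList_eq_foldl, PySem.List.dedup_eq_ofList]
  have hAnodup : dA.keys.Nodup := by
    rw [hAkeys]; exact PySem.List.nodup_dedup _
  -- B's fold inserts fresh distinct keys into the empty dict: items append in order
  rw [PySem.Dict.items_foldl_insert_fresh _ _ _ _
        (by intro a _; simp) (by simp)]
  rw [PySem.Dict.items_eq_map_keys dA hAnodup PySem.Set.empty, hAkeys]
  rw [show (PySem.Dict.empty : PySem.Dict (List String) (PySem.Set (List String))).items = [] from rfl, List.nil_append]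
  refine List.map_congr_left ?_
  intro k _
  have := pv_foldA_getD cks PySem.Dict.empty k
  rw [pv_zip_filter_map]
  simp only [PySem.Dict.getD_empty] at this
  rw [this]
  simp [PySem.Set.update, PySem.Set.ofList_eq_foldl, PySem.Set.empty]

-- ===== VERDICT (by name: the statement is the Claim_ definition above) =====
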